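-- pv_equiv track=rewrite | github.com/spendyala/my_solutions | unique.py | get_unique_number
-- ===== SOURCE A (Python) =====
-- def get_unique_number(input_str):
--     if not input_str:
--         return 0
--     # assign each character a unique number
--     char_to_prime = {
--         'a': 2,
--         'b': 3,
--         'c': 5,
--         'd': 7,
--         'e': 11,
--         'f': 13
--     }
--     output_number = 1
--     for each in input_str:
--         output_number *= char_to_prime[each]
--     return output_number
-- ===== SOURCE B (Python) =====
-- def get_unique_number(input_str):
--     if not input_str:
--         return 0
--     char_to_prime = dict(zip('abcdef', [2, 3, 5, 7, 11, 13]))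
--     counts = {}
--     for ch in input_str:
--         counts[ch] = counts.get(ch, 0) + 1
--     output_number = 1
--     for ch, cnt in counts.items():
--         output_number *= char_to_prime[ch] ** cnt
--     return output_number
-- ===== Notes on version B (the rewrite author's own statement) =====
-- stated objective: alternative
-- what changed: B builds a frequency dict over the string in one pass and multiplies prime**count once per distinct character, instead of A's one multiplication per character.
import Mathlib
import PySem

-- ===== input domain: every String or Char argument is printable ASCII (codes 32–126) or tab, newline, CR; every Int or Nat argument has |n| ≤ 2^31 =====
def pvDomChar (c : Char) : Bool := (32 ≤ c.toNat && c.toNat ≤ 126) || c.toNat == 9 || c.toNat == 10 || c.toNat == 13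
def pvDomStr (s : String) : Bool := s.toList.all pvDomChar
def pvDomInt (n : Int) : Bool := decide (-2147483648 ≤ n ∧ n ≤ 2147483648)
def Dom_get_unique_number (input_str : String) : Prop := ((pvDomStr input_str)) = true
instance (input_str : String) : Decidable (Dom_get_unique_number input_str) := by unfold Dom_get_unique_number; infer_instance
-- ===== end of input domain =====

-- B builds a frequency dict in one pass and multiplies prime**count once per distinct
-- character, instead of A's one multiplication per character (alternative decomposition).

-- ===== PORT A =====
-- the char_to_prime dict both Python sources declare
def pvCharToPrime : PySem.Dict Char Int :=
  PySem.Dict.ofList [('a', 2), ('b', 3), ('c', 5), ('d', 7), ('e', 11), ('f', 13)]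

-- char_to_prime[each]: getD 0 is exact on Pre_ (every admitted character is a key of the
-- table; Python raises KeyError on other characters, which Pre_ excludes)
def get_unique_number (input_str : String) : Int :=
  if input_str.toList = [] then 0
  else input_str.toList.foldl (fun acc c => acc * pvCharToPrime.getD c 0) 1

-- ===== PORT B =====
def get_unique_number_alt (input_str : String) : Int :=
  if input_str.toList = [] then 0
  else
    let char_to_prime : PySem.Dict Char Int :=
      PySem.Dict.ofList (List.zip "abcdef".toList [2, 3, 5, 7, 11, 13])
    let counts := input_str.toList.foldl
      (fun d c => d.insert c (d.getD c 0 + 1)) (PySem.Dict.empty : PySem.Dict Char Int)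
    counts.items.foldl (fun acc p => acc * (char_to_prime.getD p.1 0) ^ p.2.toNat) 1

-- ===== PRECONDITION & SPEC =====
-- Pre_ excludes strings containing a character that is not a key of the prime table: there both A and B raise KeyError.
def Pre_get_unique_number (input_str : String) : Prop :=
  input_str.toList.all (fun c => c ∈ ['a', 'b', 'c', 'd', 'e', 'f']) = true
instance (input_str : String) : Decidable (Pre_get_unique_number input_str) := by
  unfold Pre_get_unique_number; infer_instance

def pvWitness_get_unique_number : String := "abca"

def Spec_get_unique_number (input_str : String) (out : Int) : Prop := out = get_unique_number_alt input_str
instance (input_str : String) (out : Int) : Decidable (Spec_get_unique_number input_str out) := by unfold Spec_get_unique_number; infer_instance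

-- ===== CLAIM (what is proved, stated in full; the proofs are below) =====
def Claim_equal_get_unique_number : Prop := ∀ (input_str : String), Dom_get_unique_number input_str → Pre_get_unique_number input_str → Spec_get_unique_number input_str (get_unique_number input_str)

-- ===== LEMMAS AND PROOFS =====

-- a multiplying foldl is the product of the mapped list
theorem pv_foldl_mul {α : Type} (g : α → Int) (l : List α) (a : Int) :
    l.foldl (fun acc x => acc * g x) a = a * (l.map g).prod := by
  induction l generalizing a with
  | nil => simp
  | cons x t ih => simp [List.foldl, ih (a * g x)]; ring

theorem pv_toFinset_ofList {α : Type} [DecidableEq α] (l : List α) :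
    (PySem.Set.ofList l).toFinset = l.toFinset := by
  ext x; simp [List.mem_toFinset, PySem.Set.mem_ofList]

-- product over a list = product of prime powers over its distinct elements
theorem pv_prod_eq_prod_pow (f : Char → Int) (l : List Char) :
    (l.map f).prod =
      ((PySem.Set.ofList l).map (fun k => f k ^ l.count k)).prod := by
  rw [← List.prod_toFinset (fun k => f k ^ l.count k) (PySem.Set.nodup_ofList l),
      pv_toFinset_ofList]
  exact Finset.prod_list_map_count l f

theorem pv_dict_eq :
    PySem.Dict.ofList (List.zip "abcdef".toList [2, 3, 5, 7, 11, 13]) = pvCharToPrime := by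
  decide

theorem get_unique_number_spec : Claim_equal_get_unique_number := by
  intro s _ _
  unfold Spec_get_unique_number get_unique_number get_unique_number_alt
  by_cases h : s.toList = []
  · simp [h]
  · simp only [h, pv_dict_eq]
    rw [PySem.Dict.foldl_insert_getD_add_one_eq_counter, PySem.Dict.items_counter,
        pv_foldl_mul, pv_foldl_mul, one_mul, one_mul, List.map_map]
    rw [pv_prod_eq_prod_pow (fun c => pvCharToPrime.getD c 0) s.toList]
    simp [Function.comp_def]
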